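-- pv_equiv track=rewrite | github.com/beagan-svg/demultiplex | Assignment-the-first/partA.py | updateQuality
-- ===== SOURCE A (Python) =====
-- def convert_phred(letter):
--     phred_score = ord(letter) - 33
--     return (phred_score)
--
-- def updateQuality(q_line, qlist):
--     quality_count = 1
--     for count, score in enumerate(q_line):
--         num = convert_phred(score)
--         try:
--             qlist[count] += num
--         except:
--             qlist.append(num)
--     return qlist, quality_count
-- ===== SOURCE B (Python) =====
-- def updateQuality(q_line, qlist):
--     scores = [ord(c) - 33 for c in q_line]
--     n = min(len(qlist), len(scores))
--     merged = [a + b for a, b in zip(qlist, scores)] + qlist[n:] + scores[n:]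
--     qlist[:] = merged  # keep A's in-place mutation of qlist
--     return qlist, 1
-- ===== Notes on version B (the rewrite author's own statement) =====
-- stated objective: simpler
-- what changed: Replaces the exception-guarded per-character loop with a direct functional construction: zip-add the common prefix of qlist and the converted scores, then concatenate the leftover tail of whichever list is longer.
import Mathlib
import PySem

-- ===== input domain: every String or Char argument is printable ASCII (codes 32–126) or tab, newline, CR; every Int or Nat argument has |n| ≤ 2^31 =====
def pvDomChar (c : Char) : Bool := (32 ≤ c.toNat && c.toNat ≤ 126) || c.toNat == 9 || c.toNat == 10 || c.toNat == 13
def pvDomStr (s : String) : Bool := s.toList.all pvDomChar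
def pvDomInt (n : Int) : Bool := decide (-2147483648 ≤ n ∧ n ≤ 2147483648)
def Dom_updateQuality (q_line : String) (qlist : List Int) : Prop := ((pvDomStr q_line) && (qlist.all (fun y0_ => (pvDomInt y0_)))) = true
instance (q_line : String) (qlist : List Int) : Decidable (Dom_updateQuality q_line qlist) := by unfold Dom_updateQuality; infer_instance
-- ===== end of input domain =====

-- B builds the result directly (zip-add the common prefix, append the leftover tail)
-- instead of A's exception-guarded per-character loop; objective: simpler.
-- Equivalence is about the RETURN value; both Pythons mutate qlist in place.

-- ===== PORT A =====
-- convert_phred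
def convertPhred (letter : Char) : Int := (letter.toNat : Int) - 33

-- for count, score in enumerate(q_line): try qlist[count] += num except: qlist.append(num)
-- (inside Dom qlist holds ints, so the bare except fires exactly on IndexError, i.e. count ≥ len)
def uqLoopA : List Char → Nat → List Int → List Int
  | [], _, q => q
  | c :: cs, i, q =>
      let num := convertPhred c
      if i < q.length then
        uqLoopA cs (i + 1) (q.set i (q.getD i 0 + num))
      else
        uqLoopA cs (i + 1) (q ++ [num])

def updateQuality (q_line : String) (qlist : List Int) : List Int × Int :=
  let quality_count : Int := 1
  (uqLoopA q_line.toList 0 qlist, quality_count)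

-- ===== PORT B =====
def updateQuality_alt (q_line : String) (qlist : List Int) : List Int × Int :=
  let scores := q_line.toList.map (fun c => (c.toNat : Int) - 33)
  let n := min qlist.length scores.length
  (List.zipWith (· + ·) qlist scores ++ qlist.drop n ++ scores.drop n, 1)

-- ===== PRECONDITION & SPEC =====
def Spec_updateQuality (q_line : String) (qlist : List Int) (out : List Int × Int) : Prop := out = updateQuality_alt q_line qlist
instance (q_line : String) (qlist : List Int) (out : List Int × Int) : Decidable (Spec_updateQuality q_line qlist out) := by unfold Spec_updateQuality; infer_instance

-- ===== CLAIM (what is proved, stated in full; the proofs are below) =====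
def Claim_equal_updateQuality : Prop := ∀ (q_line : String) (qlist : List Int), Dom_updateQuality q_line qlist → Spec_updateQuality q_line qlist (updateQuality q_line qlist)

-- ===== LEMMAS AND PROOFS =====

-- B's combining operation on the suffix not yet consumed by A's loop
def uqMerge (a b : List Int) : List Int :=
  List.zipWith (· + ·) a b ++ a.drop (min a.length b.length) ++ b.drop (min a.length b.length)

theorem uqMerge_nil_right (a : List Int) : uqMerge a [] = a := by
  simp [uqMerge]

theorem uqMerge_nil_left (b : List Int) : uqMerge [] b = b := by
  simp [uqMerge]

theorem uqMerge_cons (x y : Int) (a b : List Int) :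
    uqMerge (x :: a) (y :: b) = (x + y) :: uqMerge a b := by
  simp [uqMerge, Nat.succ_min_succ]

theorem uqLoopA_eq (cs : List Char) :
    ∀ (i : Nat) (q : List Int), i ≤ q.length →
      uqLoopA cs i q = q.take i ++ uqMerge (q.drop i) (cs.map convertPhred) := by
  induction cs with
  | nil =>
      intro i q hi
      simp [uqLoopA, uqMerge_nil_right]
  | cons c cs ih =>
      intro i q hi
      by_cases h : i < q.length
      · have hx : q.drop i = q[i] :: q.drop (i + 1) := List.drop_eq_getElem_cons h
        have h1 : i + 1 ≤ (q.set i (q.getD i 0 + convertPhred c)).length := by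
          simpa using h
        rw [uqLoopA, if_pos h, ih _ _ h1]
        have hget : q.getD i 0 = q[i] := List.getD_eq_getElem q 0 h
        have htake : (q.set i (q.getD i 0 + convertPhred c)).take (i + 1)
            = q.take i ++ [q[i] + convertPhred c] := by
          simp [List.take_add_one, List.take_set, h, List.set_eq_of_length_le]
        have hdrop : (q.set i (q.getD i 0 + convertPhred c)).drop (i + 1) = q.drop (i + 1) :=
          List.drop_set_of_lt (Nat.lt_succ_self i)
        rw [htake, hdrop, hx, List.map_cons, uqMerge_cons]
        simp
      · have hieq : i = q.length := Nat.le_antisymm hi (Nat.le_of_not_lt h)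
        subst hieq
        rw [uqLoopA, if_neg h, ih _ _ (by simp)]
        simp [uqMerge_nil_left, List.take_of_length_le, List.drop_eq_nil_of_le]

-- ===== VERDICT (by name: the statement is the Claim_ definition above) =====
theorem updateQuality_spec : Claim_equal_updateQuality := by
  intro q_line qlist _
  unfold Spec_updateQuality updateQuality updateQuality_alt
  rw [uqLoopA_eq _ 0 qlist (Nat.zero_le _)]
  simp only [List.take_zero, List.drop_zero, List.nil_append, uqMerge]
  rfl
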